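-- pv_equiv track=rewrite | github.com/davis-matthew/Billy-Hatcher-Modding | Tools/find_where_offset_is_used.py | getParameter
-- ===== SOURCE A (Python) =====
-- def getParameter(sizes, offset):
--     total = 0
--     ind = 0
--     for ind in range(len(sizes)):
--         total += sizes[ind][0]
--         if total > offset:
--             return sizes[ind][1]
--     return "Out of Bounds"
-- ===== SOURCE B (Python) =====
-- def getParameter(sizes, offset):
--     table = []
--     total = 0
--     for size, label in sizes:
--         total += size
--         table.append((total, label))
--     for cum, label in table:
--         if cum > offset:
--             return label
--     return "Out of Bounds"
-- ===== Notes on version B (the rewrite author's own statement) =====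
-- stated objective: alternative
-- what changed: B splits A's fused scan into two passes: it first builds the full cumulative-total table, then scans that table for the first entry exceeding offset.
import Mathlib
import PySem

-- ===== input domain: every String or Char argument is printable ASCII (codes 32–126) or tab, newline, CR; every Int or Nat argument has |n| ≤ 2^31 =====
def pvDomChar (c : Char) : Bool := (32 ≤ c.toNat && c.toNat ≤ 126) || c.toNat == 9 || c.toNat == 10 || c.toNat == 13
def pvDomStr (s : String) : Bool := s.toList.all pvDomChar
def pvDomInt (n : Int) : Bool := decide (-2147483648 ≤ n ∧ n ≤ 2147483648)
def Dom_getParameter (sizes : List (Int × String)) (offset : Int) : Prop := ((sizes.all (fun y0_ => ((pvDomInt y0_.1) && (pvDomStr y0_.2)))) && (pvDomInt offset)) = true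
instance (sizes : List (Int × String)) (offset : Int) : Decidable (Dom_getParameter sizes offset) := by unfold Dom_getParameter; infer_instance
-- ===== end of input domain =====

-- B replaces A's fused running-sum scan with a build-then-query two-pass form (same O(n) cost; objective: alternative decomposition).


-- ===== PORT A =====
-- A's loop over indices with a running total, returning on the first total > offset.
def getParameterGo (sizes : List (Int × String)) (offset : Int) (total : Int) : String :=
  match sizes with
  | [] => "Out of Bounds"
  | (s, l) :: rest =>
      let total' := total + s
      if total' > offset then l else getParameterGo rest offset total'

def getParameter (sizes : List (Int × String)) (offset : Int) : String :=
  getParameterGo sizes offset 0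

-- ===== PORT B =====
-- pass 1: build the cumulative table of (running total, label) pairs
def buildTable (sizes : List (Int × String)) (total : Int) : List (Int × String) :=
  match sizes with
  | [] => []
  | (s, l) :: rest => (total + s, l) :: buildTable rest (total + s)

-- pass 2: first label whose cumulative total exceeds offset
def queryTable (table : List (Int × String)) (offset : Int) : String :=
  match table with
  | [] => "Out of Bounds"
  | (c, l) :: rest => if c > offset then l else queryTable rest offset

def getParameter_alt (sizes : List (Int × String)) (offset : Int) : String :=
  queryTable (buildTable sizes 0) offset

-- ===== PRECONDITION & SPEC =====
def Spec_getParameter (sizes : List (Int × String)) (offset : Int) (out : String) : Prop := out = getParameter_alt sizes offset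
instance (sizes : List (Int × String)) (offset : Int) (out : String) : Decidable (Spec_getParameter sizes offset out) := by unfold Spec_getParameter; infer_instance

-- ===== CLAIM (what is proved, stated in full; the proofs are below) =====
def Claim_equal_getParameter : Prop := ∀ (sizes : List (Int × String)) (offset : Int), Dom_getParameter sizes offset → Spec_getParameter sizes offset (getParameter sizes offset)

-- ===== LEMMAS AND PROOFS =====
theorem go_eq_query (sizes : List (Int × String)) (offset total : Int) :
    getParameterGo sizes offset total = queryTable (buildTable sizes total) offset := by
  induction sizes generalizing total with
  | nil => rfl
  | cons hd rest ih =>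
      obtain ⟨s, l⟩ := hd
      simp [getParameterGo, buildTable, queryTable, ih]

-- ===== VERDICT (by name: the statement is the Claim_ definition above) =====
theorem getParameter_spec : Claim_equal_getParameter := by
  intro sizes offset _
  unfold Spec_getParameter getParameter getParameter_alt
  exact go_eq_query sizes offset 0
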